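-- pv_equiv track=rewrite | github.com/tavarner/autocontext | autocontext/src/autocontext/scenarios/custom/agent_task_validator.py | _fuzzy_overlap
-- ===== SOURCE A (Python) =====
-- def _fuzzy_overlap(a: set[str], b: set[str], min_prefix: int = 4) -> set[str]:
--     """Find keywords that overlap exactly or share a common prefix (≥min_prefix chars).
--
--     Handles common morphological variants like "log"/"logs", "analysis"/"analyze".
--     """
--     matched: set[str] = set()
--     for word_a in a:
--         if word_a in b:
--             matched.add(word_a)
--             continue
--         if len(word_a) >= min_prefix:
--             for word_b in b:
--                 if len(word_b) >= min_prefix: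
--                     shorter = min(len(word_a), len(word_b))
--                     prefix_len = max(min_prefix, shorter - 2)
--                     if word_a[:prefix_len] == word_b[:prefix_len]:
--                         matched.add(word_a)
--                         break
--     return matched
-- ===== SOURCE B (Python) =====
-- def _fuzzy_overlap(a: set[str], b: set[str], min_prefix: int = 4) -> set[str]:
--     """Bucket b's eligible words by their first max(min_prefix, 0) characters once,
--     so each word of a is compared only against its own bucket instead of all of b."""
--     k = max(min_prefix, 0)
--     buckets: dict[str, list[str]] = {}
--     for word_b in b:
--         if len(word_b) >= min_prefix:
--             buckets.setdefault(word_b[:k], []).append(word_b)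
--     matched: set[str] = set()
--     for word_a in a:
--         if word_a in b:
--             matched.add(word_a)
--         elif len(word_a) >= min_prefix:
--             for word_b in buckets.get(word_a[:k], ()):
--                 prefix_len = max(min_prefix, min(len(word_a), len(word_b)) - 2)
--                 if word_a[:prefix_len] == word_b[:prefix_len]:
--                     matched.add(word_a)
--                     break
--     return matched
-- ===== Notes on version B (the rewrite author's own statement) =====
-- stated objective: alternative
-- what changed: B builds a dict bucketing b's eligible words by their first max(min_prefix,0) characters once, so each word of a is compared only against its own bucket instead of scanning all of b.
import Mathlib
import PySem

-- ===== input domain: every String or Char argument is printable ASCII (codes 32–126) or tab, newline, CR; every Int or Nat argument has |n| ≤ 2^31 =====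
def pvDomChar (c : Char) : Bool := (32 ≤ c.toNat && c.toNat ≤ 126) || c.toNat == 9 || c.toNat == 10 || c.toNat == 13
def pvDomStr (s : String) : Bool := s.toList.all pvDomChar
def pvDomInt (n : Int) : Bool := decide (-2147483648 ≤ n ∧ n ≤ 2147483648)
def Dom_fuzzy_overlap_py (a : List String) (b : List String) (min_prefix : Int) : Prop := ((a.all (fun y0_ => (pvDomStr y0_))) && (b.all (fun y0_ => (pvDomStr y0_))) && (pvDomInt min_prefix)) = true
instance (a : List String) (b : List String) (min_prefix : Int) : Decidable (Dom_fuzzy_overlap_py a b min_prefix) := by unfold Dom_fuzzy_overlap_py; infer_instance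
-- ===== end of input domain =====

-- B change (objective: alternative): B buckets b's eligible words by their first max(min_prefix, 0)
-- characters in a dict built once, so each word of a is compared only against its own bucket
-- instead of scanning all of b.

-- ===== PORT A =====
-- inner loop body of A: 'if len(word_b) >= min_prefix: … word_a[:prefix_len] == word_b[:prefix_len]'
def pvCheckA (m : Int) (wa wb : String) : Bool :=
  if m ≤ PySem.Str.len wb then
    PySem.List.slice wa.toList none (some (max m (min (PySem.Str.len wa) (PySem.Str.len wb) - 2)))
      == PySem.List.slice wb.toList none (some (max m (min (PySem.Str.len wa) (PySem.Str.len wb) - 2)))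
  else false

def fuzzy_overlap_py (a : List String) (b : List String) (min_prefix : Int) : List String :=
  a.foldl (fun matched word_a =>
    if b.contains word_a then PySem.Set.add matched word_a
    else if min_prefix ≤ PySem.Str.len word_a then
      if b.any (fun word_b => pvCheckA min_prefix word_a word_b) then PySem.Set.add matched word_a
      else matched
    else matched) []

-- ===== PORT B =====
def pvKeyB (m : Int) (w : String) : List Char :=
  PySem.List.slice w.toList none (some (max m 0))

def pvCheckB (m : Int) (wa wb : String) : Bool :=
  PySem.List.slice wa.toList none (some (max m (min (PySem.Str.len wa) (PySem.Str.len wb) - 2)))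
    == PySem.List.slice wb.toList none (some (max m (min (PySem.Str.len wa) (PySem.Str.len wb) - 2)))

def pvBuckets (m : Int) (b : List String) : PySem.Dict (List Char) (List String) :=
  b.foldl (fun d wb =>
    if m ≤ PySem.Str.len wb then d.modify (pvKeyB m wb) [] (· ++ [wb]) else d) PySem.Dict.empty

def fuzzy_overlap_py_alt (a : List String) (b : List String) (min_prefix : Int) : List String :=
  let buckets := pvBuckets min_prefix b
  a.foldl (fun matched word_a =>
    if b.contains word_a then PySem.Set.add matched word_a
    else if min_prefix ≤ PySem.Str.len word_a then
      if (buckets.getD (pvKeyB min_prefix word_a) []).any (fun word_b => pvCheckB min_prefix word_a word_b)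
      then PySem.Set.add matched word_a
      else matched
    else matched) []

-- ===== PRECONDITION & SPEC =====
def Spec_fuzzy_overlap_py (a : List String) (b : List String) (min_prefix : Int) (out : List String) : Prop := out = fuzzy_overlap_py_alt a b min_prefix
instance (a : List String) (b : List String) (min_prefix : Int) (out : List String) : Decidable (Spec_fuzzy_overlap_py a b min_prefix out) := by unfold Spec_fuzzy_overlap_py; infer_instance

-- ===== CLAIM (what is proved, stated in full; the proofs are below) =====
def Claim_equal_fuzzy_overlap_py : Prop := ∀ (a : List String) (b : List String) (min_prefix : Int), Dom_fuzzy_overlap_py a b min_prefix → Spec_fuzzy_overlap_py a b min_prefix (fuzzy_overlap_py a b min_prefix)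

-- ===== LEMMAS AND PROOFS =====

-- a word matching A's prefix test lands in the same bucket as word_a
theorem pvKey_of_check (m : Int) (wa wb : String) (h : pvCheckB m wa wb = true) :
    pvKeyB m wb = pvKeyB m wa := by
  unfold pvCheckB at h
  unfold pvKeyB
  by_cases hm : 0 ≤ m
  · have hk : max m 0 = m := by omega
    set p := max m (min (PySem.Str.len wa) (PySem.Str.len wb) - 2) with hpdef
    have hp : (0:Int) ≤ p := by
      have := le_max_left m (min (PySem.Str.len wa) (PySem.Str.len wb) - 2); omega
    rw [PySem.List.slice_to _ hp, PySem.List.slice_to _ hp, beq_iff_eq] at h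
    rw [hk, PySem.List.slice_to _ hm, PySem.List.slice_to _ hm]
    have hle : m.toNat ≤ p.toNat := by
      have : m ≤ p := le_max_left _ _
      omega
    calc wb.toList.take m.toNat
        = (wb.toList.take p.toNat).take m.toNat := by rw [List.take_take, Nat.min_eq_left hle]
      _ = (wa.toList.take p.toNat).take m.toNat := by rw [h]
      _ = wa.toList.take m.toNat := by rw [List.take_take, Nat.min_eq_left hle]
  · have hk : max m 0 = 0 := by omega
    rw [hk, PySem.List.slice_to _ (by omega), PySem.List.slice_to _ (by omega)]
    simp

theorem pvCheckA_eq (m : Int) (wa wb : String) :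
    pvCheckA m wa wb = (decide (m ≤ PySem.Str.len wb) && pvCheckB m wa wb) := by
  unfold pvCheckA pvCheckB
  by_cases h : m ≤ PySem.Str.len wb <;> simp_all

-- the bucket at word_a's key holds exactly b's eligible words with that key, in order
theorem pvBuckets_getD (m : Int) (b : List String) (key : List Char) :
    (pvBuckets m b).getD key []
      = b.filter (fun wb => decide (m ≤ PySem.Str.len wb) && (pvKeyB m wb == key)) := by
  unfold pvBuckets
  have hbody :
      (fun (d : PySem.Dict (List Char) (List String)) wb =>
        if m ≤ PySem.Str.len wb then d.modify (pvKeyB m wb) [] (· ++ [wb]) else d)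
    = (fun d wb =>
        if decide (m ≤ PySem.Str.len wb) = true then d.modify (pvKeyB m wb) [] (· ++ [wb]) else d) := by
    funext d wb; by_cases h : m ≤ PySem.Str.len wb <;> simp_all
  rw [hbody, ← List.foldl_filter (p := fun wb => decide (m ≤ PySem.Str.len wb)),
      show (List.filter (fun wb => decide (m ≤ PySem.Str.len wb)) b).foldl
          (fun d wb => d.modify (pvKeyB m wb) [] (· ++ [wb])) PySem.Dict.empty
        = ((List.filter (fun wb => decide (m ≤ PySem.Str.len wb)) b).map
            (fun wb => (pvKeyB m wb, wb))).foldl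
            (fun d p => d.modify p.1 [] (· ++ [p.2])) PySem.Dict.empty from
        (List.foldl_map (f := fun wb => (pvKeyB m wb, wb))
          (g := fun (d : PySem.Dict (List Char) (List String)) (p : List Char × String) =>
            d.modify p.1 [] (· ++ [p.2]))).symm,
      PySem.Dict.getD_foldl_modify_append, PySem.Dict.getD_empty, List.nil_append,
      List.filter_map, List.map_map, List.filter_filter]
  simp only [Function.comp_def]
  simp
  exact List.filter_congr fun wb _ => Bool.and_comm _ _

theorem pv_any_eq (m : Int) (b : List String) (wa : String) :
    ((pvBuckets m b).getD (pvKeyB m wa) []).any (fun wb => pvCheckB m wa wb)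
      = b.any (fun wb => pvCheckA m wa wb) := by
  rw [pvBuckets_getD, List.any_filter]
  apply List.any_congr rfl
  intro wb
  rw [pvCheckA_eq]
  by_cases h2 : pvCheckB m wa wb = true
  · simp [h2, pvKey_of_check m wa wb h2]
  · simp [Bool.eq_false_iff.mpr h2]

-- ===== VERDICT (by name: the statement is the Claim_ definition above) =====
theorem fuzzy_overlap_py_spec : Claim_equal_fuzzy_overlap_py := by
  intro a b m _
  unfold Spec_fuzzy_overlap_py fuzzy_overlap_py fuzzy_overlap_py_alt
  have hstep :
      (fun (matched : List String) (word_a : String) =>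
        if b.contains word_a then PySem.Set.add matched word_a
        else if m ≤ PySem.Str.len word_a then
          if b.any (fun word_b => pvCheckA m word_a word_b) then PySem.Set.add matched word_a
          else matched
        else matched)
    = (fun (matched : List String) (word_a : String) =>
        if b.contains word_a then PySem.Set.add matched word_a
        else if m ≤ PySem.Str.len word_a then
          if ((pvBuckets m b).getD (pvKeyB m word_a) []).any (fun word_b => pvCheckB m word_a word_b)
          then PySem.Set.add matched word_a
          else matched
        else matched) := by
    funext matched word_a
    rw [pv_any_eq]
  rw [hstep]
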